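-- pv_equiv track=rewrite | github.com/kopeadri/BPMN-Models | getting_relations.py | get_two_loop_frequency_matrix
-- ===== SOURCE A (Python) =====
-- def get_two_loop_frequency_matrix(in_log_matrix, direct_successors):
--   events = [event for event in direct_successors]
--   frequency_matrix = [[0] * len(events) for i in range(len(events))]
--   for i in range(len(events)):
--     for j in range(len(events)):
--       for log in in_log_matrix:
--         for k in range(len(log)-2):
--           if log[k] == events[i] and log[k+1] == events[j] and log[k+2]==events[i]:
--             frequency_matrix[i][j] += 1
--   return frequency_matrix
-- ===== SOURCE B (Python) =====
-- def get_two_loop_frequency_matrix(in_log_matrix, direct_successors):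
--     events = list(direct_successors)
--     counts = {}
--     for log in in_log_matrix:
--         for k in range(len(log) - 2):
--             if log[k] == log[k + 2]:
--                 pair = (log[k], log[k + 1])
--                 counts[pair] = counts.get(pair, 0) + 1
--     return [[counts.get((a, b), 0) for b in events] for a in events]
-- ===== Notes on version B (the rewrite author's own statement) =====
-- stated objective: faster
-- what changed: Replaces the quadruple loop (for every event pair, rescan every log) by one pass over the logs that counts each a,b,a triple in a hash counter keyed by the pair, then reads the matrix off the counter.
import Mathlib
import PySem

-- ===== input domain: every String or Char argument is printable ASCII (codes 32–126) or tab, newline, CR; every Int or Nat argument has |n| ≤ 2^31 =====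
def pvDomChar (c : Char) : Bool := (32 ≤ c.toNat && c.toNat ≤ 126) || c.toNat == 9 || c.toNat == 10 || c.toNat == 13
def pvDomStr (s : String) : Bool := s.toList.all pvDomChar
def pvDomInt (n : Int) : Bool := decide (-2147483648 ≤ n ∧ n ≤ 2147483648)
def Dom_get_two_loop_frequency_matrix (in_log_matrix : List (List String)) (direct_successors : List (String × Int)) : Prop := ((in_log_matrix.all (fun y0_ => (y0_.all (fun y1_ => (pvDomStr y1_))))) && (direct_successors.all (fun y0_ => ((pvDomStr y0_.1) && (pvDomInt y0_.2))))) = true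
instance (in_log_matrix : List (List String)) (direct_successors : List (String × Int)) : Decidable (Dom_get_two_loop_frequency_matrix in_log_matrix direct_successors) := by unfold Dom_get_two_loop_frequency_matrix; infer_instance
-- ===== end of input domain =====

-- B replaces A's quadruple loop by a single pass that counts a,b,a triples in a dict keyed
-- by the event pair, then reads the matrix off the dict (measurably faster, asymptotic change).


-- ===== PORT A =====
-- events = [event for event in direct_successors]: iterating the dict yields its keys
def get_two_loop_frequency_matrix (in_log_matrix : List (List String)) (direct_successors : List (String × Int)) : List (List Int) :=
  let events := (PySem.Dict.ofList direct_successors).keys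
  (PySem.List.pyRange 0 (events.length : Int) 1).map (fun i =>
    (PySem.List.pyRange 0 (events.length : Int) 1).map (fun j =>
      in_log_matrix.foldl (fun c log =>
        (PySem.List.pyRange 0 ((log.length : Int) - 2) 1).foldl (fun c k =>
          if PySem.List.pyGetD log k "" == PySem.List.pyGetD events i "" &&
             PySem.List.pyGetD log (k + 1) "" == PySem.List.pyGetD events j "" &&
             PySem.List.pyGetD log (k + 2) "" == PySem.List.pyGetD events i ""
          then c + 1 else c) c) 0))

-- ===== PORT B =====
def get_two_loop_frequency_matrix_alt (in_log_matrix : List (List String)) (direct_successors : List (String × Int)) : List (List Int) :=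
  let events := (PySem.Dict.ofList direct_successors).keys
  let counts := in_log_matrix.foldl (fun d log =>
    (PySem.List.pyRange 0 ((log.length : Int) - 2) 1).foldl (fun d k =>
      if PySem.List.pyGetD log k "" == PySem.List.pyGetD log (k + 2) ""
      then PySem.Dict.modify d (PySem.List.pyGetD log k "", PySem.List.pyGetD log (k + 1) "") 0 (· + 1)
      else d) d) PySem.Dict.empty
  events.map (fun a => events.map (fun b => PySem.Dict.getD counts (a, b) 0))

-- ===== PRECONDITION & SPEC =====
def Spec_get_two_loop_frequency_matrix (in_log_matrix : List (List String)) (direct_successors : List (String × Int)) (out : List (List Int)) : Prop := out = get_two_loop_frequency_matrix_alt in_log_matrix direct_successors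
instance (in_log_matrix : List (List String)) (direct_successors : List (String × Int)) (out : List (List Int)) : Decidable (Spec_get_two_loop_frequency_matrix in_log_matrix direct_successors out) := by unfold Spec_get_two_loop_frequency_matrix; infer_instance

-- ===== CLAIM (what is proved, stated in full; the proofs are below) =====
def Claim_equal_get_two_loop_frequency_matrix : Prop := ∀ (in_log_matrix : List (List String)) (direct_successors : List (String × Int)), Dom_get_two_loop_frequency_matrix in_log_matrix direct_successors → Spec_get_two_loop_frequency_matrix in_log_matrix direct_successors (get_two_loop_frequency_matrix in_log_matrix direct_successors)

-- ===== LEMMAS AND PROOFS =====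

-- the (log[k], log[k+1]) pairs of the a,b,a triples of one log
def pvTriples (l : List String) : List (String × String) :=
  ((PySem.List.pyRange 0 ((l.length : Int) - 2) 1).filter
      (fun k => PySem.List.pyGetD l k "" == PySem.List.pyGetD l (k + 2) "")).map
    (fun k => (PySem.List.pyGetD l k "", PySem.List.pyGetD l (k + 1) ""))

-- A's innermost loop over one log counts the (a, b) triples of that log
lemma pvInnerA (l : List String) (a b : String) (c : Int) :
    (PySem.List.pyRange 0 ((l.length : Int) - 2) 1).foldl (fun c k =>
        if PySem.List.pyGetD l k "" == a &&
           PySem.List.pyGetD l (k + 1) "" == b &&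
           PySem.List.pyGetD l (k + 2) "" == a
        then c + 1 else c) c
      = c + ((pvTriples l).count (a, b) : Int) := by
  rw [PySem.List.foldl_if_add_one]
  congr 2
  unfold pvTriples
  rw [List.count_eq_countP, List.countP_map, List.countP_filter]
  apply List.countP_congr
  intro k _
  simp only [Function.comp]
  rw [Bool.eq_iff_iff]
  simp only [Bool.and_eq_true, beq_iff_eq, Prod.mk.injEq, iff_true]
  constructor
  · rintro ⟨⟨h1, h2⟩, h3⟩
    exact ⟨⟨h1, h2⟩, h1.trans h3.symm⟩
  · rintro ⟨⟨h1, h2⟩, h3⟩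
    exact ⟨⟨h1, h2⟩, h3.symm.trans h1⟩

-- A's two inner loops compute the triple count over all logs
lemma pvCellA (logs : List (List String)) (a b : String) (c : Int) :
    logs.foldl (fun c log =>
        (PySem.List.pyRange 0 ((log.length : Int) - 2) 1).foldl (fun c k =>
          if PySem.List.pyGetD log k "" == a &&
             PySem.List.pyGetD log (k + 1) "" == b &&
             PySem.List.pyGetD log (k + 2) "" == a
          then c + 1 else c) c) c
      = c + ((logs.flatMap pvTriples).count (a, b) : Int) := by
  induction logs generalizing c with
  | nil => simp
  | cons l t ih =>
    simp only [List.foldl_cons, List.flatMap_cons, List.count_append]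
    rw [pvInnerA, ih]
    push_cast
    ring

-- B's counter loop: final lookup of a pair = its triple count over all logs
lemma pvCellB (logs : List (List String)) (d : PySem.Dict (String × String) Int) (p : String × String) :
    (logs.foldl (fun d log =>
        (PySem.List.pyRange 0 ((log.length : Int) - 2) 1).foldl (fun d k =>
          if PySem.List.pyGetD log k "" == PySem.List.pyGetD log (k + 2) ""
          then PySem.Dict.modify d (PySem.List.pyGetD log k "", PySem.List.pyGetD log (k + 1) "") 0 (· + 1)
          else d) d) d).getD p 0
      = d.getD p 0 + ((logs.flatMap pvTriples).count p : Int) := by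
  induction logs generalizing d with
  | nil => simp
  | cons l t ih =>
    simp only [List.foldl_cons, List.flatMap_cons, List.count_append]
    rw [ih]
    have hinner : (PySem.List.pyRange 0 ((l.length : Int) - 2) 1).foldl (fun d k =>
          if PySem.List.pyGetD l k "" == PySem.List.pyGetD l (k + 2) ""
          then PySem.Dict.modify d (PySem.List.pyGetD l k "", PySem.List.pyGetD l (k + 1) "") 0 (· + 1)
          else d) d
        = (pvTriples l).foldl (fun d x => PySem.Dict.modify d x 0 (· + 1)) d := by
      rw [PySem.List.foldl_if_eq_foldl_filter]
      unfold pvTriples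
      rw [List.foldl_map]
    rw [hinner, PySem.Dict.getD_foldl_modify_add_one]
    push_cast
    ring

-- mapping a function of events[i] over range(len(events)) is mapping it over events
lemma pvMapRange {α : Type} (xs : List String) (f : String → α) :
    (PySem.List.pyRange 0 (xs.length : Int) 1).map (fun i => f (PySem.List.pyGetD xs i "")) = xs.map f := by
  have h := PySem.List.map_pyGetD_pyRange_zero' (xs := xs) (d := "")
  calc (PySem.List.pyRange 0 (xs.length : Int) 1).map (fun i => f (PySem.List.pyGetD xs i ""))
      = ((PySem.List.pyRange 0 (xs.length : Int) 1).map (fun i => PySem.List.pyGetD xs i "")).map f := by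
        rw [List.map_map]; rfl
    _ = xs.map f := by rw [h]

-- the doubly indexed map over range(len(events)) is the doubly valued map over events
lemma pvOuter {α : Type} (E : List String) (G : String → String → α) :
    (PySem.List.pyRange 0 (E.length : Int) 1).map (fun i =>
        (PySem.List.pyRange 0 (E.length : Int) 1).map (fun j =>
          G (PySem.List.pyGetD E i "") (PySem.List.pyGetD E j "")))
      = E.map (fun a => E.map (fun b => G a b)) := by
  rw [pvMapRange E (fun a => (PySem.List.pyRange 0 (E.length : Int) 1).map (fun j => G a (PySem.List.pyGetD E j "")))]
  apply List.map_congr_left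
  intro a _
  exact pvMapRange E (G a)

-- ===== VERDICT (by name: the statement is the Claim_ definition above) =====
theorem get_two_loop_frequency_matrix_spec : Claim_equal_get_two_loop_frequency_matrix := by
  intro logs ds _
  unfold Spec_get_two_loop_frequency_matrix get_two_loop_frequency_matrix get_two_loop_frequency_matrix_alt
  simp only []
  rw [pvOuter ((PySem.Dict.ofList ds).keys) (fun a b =>
    logs.foldl (fun c log =>
      (PySem.List.pyRange 0 ((log.length : Int) - 2) 1).foldl (fun c k =>
        if PySem.List.pyGetD log k "" == a &&
           PySem.List.pyGetD log (k + 1) "" == b &&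
           PySem.List.pyGetD log (k + 2) "" == a
        then c + 1 else c) c) 0)]
  apply List.map_congr_left
  intro a _
  apply List.map_congr_left
  intro b _
  rw [pvCellA, pvCellB, PySem.Dict.getD_empty]
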